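-- pv_equiv track=rewrite | github.com/konu90/sustainability | scrapping.py | crearUrls
-- ===== SOURCE A (Python) =====
-- def crearUrls(anyoInicio,anyoFin,ide,sid):
--     #Creamos una lista(fechaInicio) para crear la fecha de inicio de los rangos de fechas de las que se van a pedir datos
--     fechaInicio = []
--     for anyo in range (anyoInicio,anyoFin+1):
--         for mes in range (1,13):
--             if(mes <= 9):
--                 fecha = str(anyo)+"0"+str(mes)+"01"
--             else:
--                 fecha = str(anyo)+str(mes)+"01"
--             fechaInicio.append(fecha)
--
--     #Creamos una lista(fechaFin) para crear la fecha de fin de los rangos de fechas de las que se van a pedir datos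
--     fechaFin = []
--     for anyo in range (anyoInicio,anyoFin+1):
--         for mes in range (1,13):
--             #Añadir el 0 a la fecha
--             if(mes <= 9):
--                 fecha = str(anyo)+"0"+str(mes)
--             else:
--                 fecha = str(anyo)+str(mes)
--             #Comprobar si es bisiesto
--             if(mes == 2):
--                 if(anyo%4 == 0 and anyo%100 != 0 or anyo%400 == 0):
--                     fecha = fecha + "29"
--                 else:
--                     fecha = fecha + "28"
--             elif(mes == 1 or mes == 3 or mes == 5 or mes == 7 or mes == 8 or mes == 10 or mes==12 ):
--                 fecha = fecha+"31"
--             else: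
--                 fecha = fecha+"30"
--             fechaFin.append(fecha)
--
--     #Creamos la lista fechaAux, para el primer dia de cada mes de los meses que tienen 31 dias,
--     #ya que por limitaciones de la web, se muestran maximo 30 registros
--     fechaAux = []
--     for anyo in range (anyoInicio,anyoFin+1):
--         for mes in range (1,13):
--             #Si el mes tiene 31 dias...
--             if(mes == 1 or mes == 3 or mes == 5 or mes == 7 or mes == 8 or mes == 10 or mes==12):
--                 #Añadir el 0 a la fecha
--                 if(mes <= 9):
--                     fecha = str(anyo)+"0"+str(mes) + "01"
--                 else:
--                     fecha = str(anyo)+str(mes) + "01"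
--                 fechaAux.append(fecha)
--
--     #Lista de urls construidas para pedir la informacion
--     #Todas las fechas
--     urls = []
--     for i in range (0, len(fechaInicio)):
--         urls.append("https://pvoutput.org/list.jsp?df=" +str(fechaInicio[i]) + "&dt=" + str(fechaFin[i]) + "&id=" + str(ide) +"&sid=" + str(sid) + "&t=y&v=0")
--     #Para los meses de 31 dias, creamos urls que piden unicamente el primer dia de ese mes
--     for i in range(0,len(fechaAux)):
--         urls.append("https://pvoutput.org/list.jsp?df=" +str(fechaAux[i]) + "&dt=" + str(fechaAux[i]) + "&id=" + str(ide) +"&sid=" + str(sid) + "&t=y&v=0")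
--
--     return urls
-- ===== SOURCE B (Python) =====
-- def crearUrls(anyoInicio, anyoFin, ide, sid):
--     # Single fused loop over (year, month); no intermediate date lists.
--     urls = []
--     aux_urls = []
--     for anyo in range(anyoInicio, anyoFin + 1):
--         for mes in range(1, 13):
--             mm = "0" + str(mes) if mes <= 9 else str(mes)
--             start = str(anyo) + mm + "01"
--             if mes == 2:
--                 days = "29" if (anyo % 4 == 0 and anyo % 100 != 0 or anyo % 400 == 0) else "28"
--             elif mes == 1 or mes == 3 or mes == 5 or mes == 7 or mes == 8 or mes == 10 or mes == 12:
--                 days = "31"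
--             else:
--                 days = "30"
--             end = str(anyo) + mm + days
--             urls.append("https://pvoutput.org/list.jsp?df=" + start + "&dt=" + end + "&id=" + str(ide) + "&sid=" + str(sid) + "&t=y&v=0")
--             if days == "31":
--                 aux_urls.append("https://pvoutput.org/list.jsp?df=" + start + "&dt=" + start + "&id=" + str(ide) + "&sid=" + str(sid) + "&t=y&v=0")
--     return urls + aux_urls
-- ===== Notes on version B (the rewrite author's own statement) =====
-- stated objective: simpler
-- what changed: Replaces A's five separate year-by-month passes (three date-list builders plus two indexing URL loops) with one fused loop over (year, month) that builds the two URL lists directly and returns their concatenation; no intermediate fechaInicio/fechaFin/fechaAux lists and no list indexing.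
import Mathlib
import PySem

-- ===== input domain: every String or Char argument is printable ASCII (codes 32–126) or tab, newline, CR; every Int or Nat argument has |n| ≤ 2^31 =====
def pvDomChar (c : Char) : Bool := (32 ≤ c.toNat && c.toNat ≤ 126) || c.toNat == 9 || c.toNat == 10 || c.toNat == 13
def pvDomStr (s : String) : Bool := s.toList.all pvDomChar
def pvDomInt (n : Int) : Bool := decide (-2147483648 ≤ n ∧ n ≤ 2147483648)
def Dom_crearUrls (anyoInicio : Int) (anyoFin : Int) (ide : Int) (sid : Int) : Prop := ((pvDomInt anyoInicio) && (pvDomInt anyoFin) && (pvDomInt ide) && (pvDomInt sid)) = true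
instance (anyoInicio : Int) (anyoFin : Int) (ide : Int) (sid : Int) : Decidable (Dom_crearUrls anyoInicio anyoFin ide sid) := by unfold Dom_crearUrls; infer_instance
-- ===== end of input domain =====

-- B fuses A's five per-(year,month) passes into one loop building the two URL lists directly (objective: simpler; same cost).

-- ===== PORT A =====
-- list indexing fechaInicio[i]/fechaFin[i]/fechaAux[i] is ported with pyGetD; the loop index i
-- ranges over range(0, len(list)), so the access is always in range and the port is exact.
def crearUrls (anyoInicio : Int) (anyoFin : Int) (ide : Int) (sid : Int) : List String :=
  let fechaInicio := (PySem.List.pyRange anyoInicio (anyoFin + 1)).foldl (fun acc anyo =>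
      (PySem.List.pyRange 1 13).foldl (fun acc2 mes =>
        acc2 ++ [if mes ≤ 9 then PySem.Int.toStr anyo ++ "0" ++ PySem.Int.toStr mes ++ "01"
                 else PySem.Int.toStr anyo ++ PySem.Int.toStr mes ++ "01"]) acc) []
  let fechaFin := (PySem.List.pyRange anyoInicio (anyoFin + 1)).foldl (fun acc anyo =>
      (PySem.List.pyRange 1 13).foldl (fun acc2 mes =>
        let fecha := if mes ≤ 9 then PySem.Int.toStr anyo ++ "0" ++ PySem.Int.toStr mes
                     else PySem.Int.toStr anyo ++ PySem.Int.toStr mes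
        let fecha := if mes == 2 then
            (if (PySem.Int.mod anyo 4 == 0 && PySem.Int.mod anyo 100 != 0) || PySem.Int.mod anyo 400 == 0
             then fecha ++ "29" else fecha ++ "28")
          else if mes == 1 || mes == 3 || mes == 5 || mes == 7 || mes == 8 || mes == 10 || mes == 12 then
            fecha ++ "31"
          else fecha ++ "30"
        acc2 ++ [fecha]) acc) []
  let fechaAux := (PySem.List.pyRange anyoInicio (anyoFin + 1)).foldl (fun acc anyo =>
      (PySem.List.pyRange 1 13).foldl (fun acc2 mes =>
        if mes == 1 || mes == 3 || mes == 5 || mes == 7 || mes == 8 || mes == 10 || mes == 12 then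
          acc2 ++ [if mes ≤ 9 then PySem.Int.toStr anyo ++ "0" ++ PySem.Int.toStr mes ++ "01"
                   else PySem.Int.toStr anyo ++ PySem.Int.toStr mes ++ "01"]
        else acc2) acc) []
  let urls := (PySem.List.pyRange 0 (PySem.List.len fechaInicio)).foldl (fun acc i =>
      acc ++ ["https://pvoutput.org/list.jsp?df=" ++ PySem.List.pyGetD fechaInicio i "" ++ "&dt=" ++
              PySem.List.pyGetD fechaFin i "" ++ "&id=" ++ PySem.Int.toStr ide ++ "&sid=" ++
              PySem.Int.toStr sid ++ "&t=y&v=0"]) []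
  let urls := (PySem.List.pyRange 0 (PySem.List.len fechaAux)).foldl (fun acc i =>
      acc ++ ["https://pvoutput.org/list.jsp?df=" ++ PySem.List.pyGetD fechaAux i "" ++ "&dt=" ++
              PySem.List.pyGetD fechaAux i "" ++ "&id=" ++ PySem.Int.toStr ide ++ "&sid=" ++
              PySem.Int.toStr sid ++ "&t=y&v=0"]) urls
  urls

-- ===== PORT B =====
def crearUrls_alt (anyoInicio : Int) (anyoFin : Int) (ide : Int) (sid : Int) : List String :=
  let p := (PySem.List.pyRange anyoInicio (anyoFin + 1)).foldl (fun (p : List String × List String) anyo =>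
      (PySem.List.pyRange 1 13).foldl (fun (q : List String × List String) mes =>
        let mm := if mes ≤ 9 then "0" ++ PySem.Int.toStr mes else PySem.Int.toStr mes
        let start := PySem.Int.toStr anyo ++ mm ++ "01"
        let days := if mes == 2 then
            (if (PySem.Int.mod anyo 4 == 0 && PySem.Int.mod anyo 100 != 0) || PySem.Int.mod anyo 400 == 0
             then "29" else "28")
          else if mes == 1 || mes == 3 || mes == 5 || mes == 7 || mes == 8 || mes == 10 || mes == 12 then "31"
          else "30"
        let endd := PySem.Int.toStr anyo ++ mm ++ days
        (q.1 ++ ["https://pvoutput.org/list.jsp?df=" ++ start ++ "&dt=" ++ endd ++ "&id=" ++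
                 PySem.Int.toStr ide ++ "&sid=" ++ PySem.Int.toStr sid ++ "&t=y&v=0"],
         if days == "31" then
           q.2 ++ ["https://pvoutput.org/list.jsp?df=" ++ start ++ "&dt=" ++ start ++ "&id=" ++
                   PySem.Int.toStr ide ++ "&sid=" ++ PySem.Int.toStr sid ++ "&t=y&v=0"]
         else q.2)) p) (([] : List String), ([] : List String))
  p.1 ++ p.2

-- ===== PRECONDITION & SPEC =====
def Spec_crearUrls (anyoInicio : Int) (anyoFin : Int) (ide : Int) (sid : Int) (out : List String) : Prop := out = crearUrls_alt anyoInicio anyoFin ide sid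
instance (anyoInicio : Int) (anyoFin : Int) (ide : Int) (sid : Int) (out : List String) : Decidable (Spec_crearUrls anyoInicio anyoFin ide sid out) := by unfold Spec_crearUrls; infer_instance

-- ===== CLAIM (what is proved, stated in full; the proofs are below) =====
def Claim_equal_crearUrls : Prop := ∀ (anyoInicio : Int) (anyoFin : Int) (ide : Int) (sid : Int), Dom_crearUrls anyoInicio anyoFin ide sid → Spec_crearUrls anyoInicio anyoFin ide sid (crearUrls anyoInicio anyoFin ide sid)

-- ===== LEMMAS AND PROOFS =====

lemma pv_hM : PySem.List.pyRange 1 13 = [1,2,3,4,5,6,7,8,9,10,11,12] := by decide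

lemma pv_pairfold_inner (l : List Int) (f : Int → String) (p : Int → Bool) (g : Int → String)
    (init : List String × List String) :
    List.foldl (fun q x => (q.1 ++ [f x], if p x then q.2 ++ [g x] else q.2)) init l
      = (init.1 ++ l.map f, init.2 ++ (l.filter p).map g) := by
  induction l generalizing init with
  | nil => simp
  | cons x t ih => by_cases hp : p x <;> simp [List.foldl_cons, ih, hp]

lemma pv_pairfold_outer (l : List Int) (F G : Int → List String) (init : List String × List String) :
    List.foldl (fun q x => (q.1 ++ F x, q.2 ++ G x)) init l
      = (init.1 ++ l.flatMap F, init.2 ++ l.flatMap G) := by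
  induction l generalizing init with
  | nil => simp
  | cons x t ih => simp [List.foldl_cons, ih]

lemma pv_flatMap_congr {l : List Int} {f g : Int → List String} (h : ∀ y ∈ l, f y = g y) :
    l.flatMap f = l.flatMap g := by
  induction l with
  | nil => rfl
  | cons x t ih =>
    simp only [List.flatMap_cons, h x (by simp)]
    rw [ih (fun y hy => h y (by simp [hy]))]

lemma pv_flatzip (u : String × String → String) (bI bF : Int → List String)
    (h : ∀ y, (bI y).length = (bF y).length) (Y : List Int) :
    ((Y.flatMap bI).zip (Y.flatMap bF)).map u = Y.flatMap (fun y => ((bI y).zip (bF y)).map u) := by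
  induction Y with
  | nil => simp
  | cons y t ih =>
    rw [List.flatMap_cons, List.flatMap_cons, List.zip_append (h y), List.map_append, ih,
        List.flatMap_cons]

lemma pv_map_zip_gen (u : String → String → String) (xs ys : List String) (h : xs.length = ys.length) :
    (PySem.List.pyRange 0 (xs.length : Int)).map
        (fun j => u (PySem.List.pyGetD xs j "") (PySem.List.pyGetD ys j ""))
      = (xs.zip ys).map (fun p => u p.1 p.2) := by
  have hz : (xs.zip ys).length = xs.length := by rw [List.length_zip, h, min_self]
  have step1 : ∀ j ∈ PySem.List.pyRange 0 (xs.length : Int),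
      u (PySem.List.pyGetD xs j "") (PySem.List.pyGetD ys j "")
        = (fun p : String × String => u p.1 p.2) (PySem.List.pyGetD (xs.zip ys) j ("", "")) := by
    intro j hj
    rw [PySem.List.mem_pyRange_one] at hj
    rw [PySem.List.pyGetD_eq_getElem xs "" hj.1 hj.2,
        PySem.List.pyGetD_eq_getElem ys "" hj.1 (by rw [← h]; exact hj.2),
        PySem.List.pyGetD_eq_getElem (xs.zip ys) ("", "") hj.1 (by rw [hz]; exact hj.2),
        List.getElem_zip]
  calc (PySem.List.pyRange 0 (xs.length : Int)).map
        (fun j => u (PySem.List.pyGetD xs j "") (PySem.List.pyGetD ys j ""))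
      = (PySem.List.pyRange 0 (xs.length : Int)).map
        (fun j => (fun p : String × String => u p.1 p.2) (PySem.List.pyGetD (xs.zip ys) j ("", ""))) :=
        List.map_congr_left step1
    _ = ((PySem.List.pyRange 0 ((xs.zip ys).length : Int)).map
          (fun j => PySem.List.pyGetD (xs.zip ys) j ("", ""))).map (fun p : String × String => u p.1 p.2) := by
        rw [hz, List.map_map]; rfl
    _ = (xs.zip ys).map (fun p => u p.1 p.2) := by
        rw [PySem.List.map_pyGetD_pyRange_zero']

lemma pv_zip_flat (i s : Int) (Y M : List Int) (f g : Int → Int → String) :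
    (PySem.List.pyRange 0 (PySem.List.len (Y.flatMap fun y => M.map (f y)))).map
        (fun j => "https://pvoutput.org/list.jsp?df=" ++
          PySem.List.pyGetD (Y.flatMap fun y => M.map (f y)) j "" ++ "&dt=" ++
          PySem.List.pyGetD (Y.flatMap fun y => M.map (g y)) j "" ++ "&id=" ++
          PySem.Int.toStr i ++ "&sid=" ++ PySem.Int.toStr s ++ "&t=y&v=0")
      = Y.flatMap (fun y => M.map (fun m => "https://pvoutput.org/list.jsp?df=" ++ f y m ++ "&dt=" ++
          g y m ++ "&id=" ++ PySem.Int.toStr i ++ "&sid=" ++ PySem.Int.toStr s ++ "&t=y&v=0")) := by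
  have hlen : (Y.flatMap fun y => M.map (f y)).length = (Y.flatMap fun y => M.map (g y)).length := by
    simp [List.length_flatMap]
  have hper : ∀ y, (M.map (f y)).length = (M.map (g y)).length := by simp
  rw [PySem.List.len_eq,
      pv_map_zip_gen (fun d1 d2 => "https://pvoutput.org/list.jsp?df=" ++ d1 ++ "&dt=" ++ d2 ++
        "&id=" ++ PySem.Int.toStr i ++ "&sid=" ++ PySem.Int.toStr s ++ "&t=y&v=0")
        (Y.flatMap fun y => M.map (f y)) (Y.flatMap fun y => M.map (g y)) hlen,
      pv_flatzip _ _ _ hper Y]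
  apply pv_flatMap_congr
  intro y _
  rw [List.zip_map', List.map_map]
  rfl

lemma pv_aux_map (i s : Int) (xs : List String) :
    (PySem.List.pyRange 0 (PySem.List.len xs)).map
        (fun j => "https://pvoutput.org/list.jsp?df=" ++ PySem.List.pyGetD xs j "" ++ "&dt=" ++
          PySem.List.pyGetD xs j "" ++ "&id=" ++ PySem.Int.toStr i ++ "&sid=" ++
          PySem.Int.toStr s ++ "&t=y&v=0")
      = xs.map (fun d => "https://pvoutput.org/list.jsp?df=" ++ d ++ "&dt=" ++ d ++ "&id=" ++
          PySem.Int.toStr i ++ "&sid=" ++ PySem.Int.toStr s ++ "&t=y&v=0") := by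
  rw [PySem.List.len_eq]
  calc (PySem.List.pyRange 0 ((xs.length : Int))).map
        (fun j => "https://pvoutput.org/list.jsp?df=" ++ PySem.List.pyGetD xs j "" ++ "&dt=" ++
          PySem.List.pyGetD xs j "" ++ "&id=" ++ PySem.Int.toStr i ++ "&sid=" ++
          PySem.Int.toStr s ++ "&t=y&v=0")
      = ((PySem.List.pyRange 0 ((xs.length : Int))).map (fun j => PySem.List.pyGetD xs j "")).map
          (fun d => "https://pvoutput.org/list.jsp?df=" ++ d ++ "&dt=" ++ d ++ "&id=" ++
            PySem.Int.toStr i ++ "&sid=" ++ PySem.Int.toStr s ++ "&t=y&v=0") := by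
        rw [List.map_map]; rfl
    _ = _ := by rw [PySem.List.map_pyGetD_pyRange_zero']

set_option maxHeartbeats 2000000 in
theorem pv_eq (a b i s : Int) : crearUrls a b i s = crearUrls_alt a b i s := by
  simp only [crearUrls, crearUrls_alt,
    PySem.List.foldl_append_singleton_eq_map, PySem.List.foldl_append_if,
    PySem.List.foldl_append_eq_flatMap, pv_pairfold_inner, pv_pairfold_outer,
    List.nil_append]
  rw [pv_zip_flat, pv_aux_map]
  refine congrArg₂ (· ++ ·) ?_ ?_
  · apply pv_flatMap_congr
    intro y _
    by_cases hL : (4 ∣ y ∧ ¬(100 ∣ y)) ∨ 400 ∣ y <;>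
      simp [pv_hM, hL, ← String.append_assoc]
  · rw [List.map_flatMap]
    apply pv_flatMap_congr
    intro y _
    by_cases hL : (4 ∣ y ∧ ¬(100 ∣ y)) ∨ 400 ∣ y <;>
      simp [pv_hM, hL, ← String.append_assoc]

-- ===== VERDICT (by name: the statement is the Claim_ definition above) =====
theorem crearUrls_spec : Claim_equal_crearUrls := by
  intro a b i s _
  unfold Spec_crearUrls
  exact pv_eq a b i s
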